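-- pv_equiv track=rewrite | github.com/hapi-server/server-metadata | table.py | reorder_keys
-- ===== SOURCE A (Python) =====
-- def reorder_keys(d):
--   # move keys starting with 'x_' to the end, preserving relative order
--   x_items = [(k, d[k]) for k in d.keys() if k.startswith('x_')]
--   other_items = [(k, d[k]) for k in d.keys() if not k.startswith('x_')]
--   newd = {}
--   for k, v in other_items:
--     newd[k] = v
--   for k, v in x_items:
--     newd[k] = v
--   return newd
-- ===== SOURCE B (Python) =====
-- def reorder_keys(d):
--   # move keys starting with 'x_' to the end, preserving relative order
--   return dict(sorted(d.items(), key=lambda kv: kv[0].startswith('x_')))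
-- ===== Notes on version B (the rewrite author's own statement) =====
-- stated objective: idiomatic
-- what changed: Replaces the two filtering comprehensions plus two dict-populate loops with a single stable sort of d.items() by the boolean key startswith('x_'), whose stability keeps relative order within each group.
import Mathlib
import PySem

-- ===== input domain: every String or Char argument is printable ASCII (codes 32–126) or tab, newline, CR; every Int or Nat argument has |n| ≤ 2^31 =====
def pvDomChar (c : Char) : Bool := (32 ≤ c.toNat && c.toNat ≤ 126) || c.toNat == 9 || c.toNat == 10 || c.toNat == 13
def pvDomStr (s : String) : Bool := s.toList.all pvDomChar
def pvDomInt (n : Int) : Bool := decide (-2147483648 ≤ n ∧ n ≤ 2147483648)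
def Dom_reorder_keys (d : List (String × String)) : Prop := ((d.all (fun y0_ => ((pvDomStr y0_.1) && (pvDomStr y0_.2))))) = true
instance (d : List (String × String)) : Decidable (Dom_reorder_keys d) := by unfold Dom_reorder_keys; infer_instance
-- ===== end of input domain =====

-- B replaces A's two filtering passes plus two dict-populate loops by one stable sort of the
-- items keyed on the boolean startswith('x_'); same return value, no speed claim.

-- ===== PORT A =====
-- d[k] with k drawn from d.keys() never raises, so it is ported as Dict.getD (exact here).
def reorder_keys (d : List (String × String)) : List (String × String) :=
  let dd := PySem.Dict.mk d
  let x_items := (dd.keys.filter (fun k => PySem.Str.startswith k "x_")).map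
    (fun k => (k, dd.getD k ""))
  let other_items := (dd.keys.filter (fun k => !PySem.Str.startswith k "x_")).map
    (fun k => (k, dd.getD k ""))
  let newd := other_items.foldl (fun nd kv => nd.insert kv.1 kv.2) PySem.Dict.empty
  let newd := x_items.foldl (fun nd kv => nd.insert kv.1 kv.2) newd
  newd.items

-- ===== PORT B =====
def reorder_keys_alt (d : List (String × String)) : List (String × String) :=
  (PySem.Dict.ofList (PySem.List.sorted (PySem.Dict.mk d).items
    (fun kv => PySem.Str.startswith kv.1 "x_") false)).items

-- ===== PRECONDITION & SPEC =====
-- d encodes a Python dict, whose keys are necessarily distinct; lists with duplicate keys do not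
-- encode any input A accepts, so they are excluded.
def Pre_reorder_keys (d : List (String × String)) : Prop := (d.map Prod.fst).Nodup
instance (d : List (String × String)) : Decidable (Pre_reorder_keys d) := by
  unfold Pre_reorder_keys; infer_instance

def pvWitness_reorder_keys : (List (String × String)) := [("a", "1"), ("x_b", "2"), ("c", "3")]

def Spec_reorder_keys (d : List (String × String)) (out : List (String × String)) : Prop := out = reorder_keys_alt d
instance (d : List (String × String)) (out : List (String × String)) : Decidable (Spec_reorder_keys d out) := by unfold Spec_reorder_keys; infer_instance

-- ===== CLAIM (what is proved, stated in full; the proofs are below) =====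
def Claim_equal_reorder_keys : Prop := ∀ (d : List (String × String)), Dom_reorder_keys d → Pre_reorder_keys d → Spec_reorder_keys d (reorder_keys d)

-- ===== LEMMAS AND PROOFS =====

lemma before_eq {α : Type} (key : α → Bool) :
    (fun a b => decide (key a < key b)) = (fun a b => !key a && key b) := by
  funext a b; cases key a <;> cases key b <;> decide

-- Inserting x into a false-block ++ true-block list (by the Bool key) lands x at the end of its block.
lemma insertBy_bool_blocks {α : Type} (key : α → Bool) (x : α) (F T : List α)
    (hF : ∀ y ∈ F, key y = false) (hT : ∀ y ∈ T, key y = true) :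
    PySem.List.insertBy (fun a b => !key a && key b) x (F ++ T) =
      if key x then F ++ T ++ [x] else F ++ x :: T := by
  induction F with
  | nil =>
    simp only [List.nil_append]
    induction T with
    | nil => simp [PySem.List.insertBy]
    | cons y ys ihT =>
      have hy := hT y (by simp)
      have ihT' := ihT (fun z hz => hT z (by simp [hz]))
      cases hx : key x with
      | false => simp [PySem.List.insertBy, hx, hy]
      | true =>
        rw [hx, if_pos rfl] at ihT'
        simp [PySem.List.insertBy, hx, hy, ihT']
  | cons f F' ihF =>
    have hf := hF f (by simp)
    have ihF' := ihF (fun z hz => hF z (by simp [hz]))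
    cases hx : key x with
    | false =>
      rw [hx, if_neg (by simp)] at ihF'
      simp [PySem.List.insertBy, hf, ihF']
    | true =>
      rw [hx, if_pos rfl] at ihF'
      simp [PySem.List.insertBy, hf, ihF']

lemma foldl_insertBy_bool {α : Type} (key : α → Bool) (xs : List α) (F T : List α)
    (hF : ∀ y ∈ F, key y = false) (hT : ∀ y ∈ T, key y = true) :
    xs.foldl (fun acc x => PySem.List.insertBy (fun a b => !key a && key b) x acc) (F ++ T) =
      (F ++ xs.filter (fun x => !key x)) ++ (T ++ xs.filter key) := by
  induction xs generalizing F T with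
  | nil => simp
  | cons x xs ih =>
    simp only [List.foldl_cons, insertBy_bool_blocks key x F T hF hT]
    cases hx : key x with
    | false =>
      rw [if_neg (by simp)]
      have hF' : ∀ y ∈ F ++ [x], key y = false := by
        intro y hy
        rcases List.mem_append.1 hy with h | h
        · exact hF y h
        · simp at h; rw [h]; exact hx
      have hFx : F ++ x :: T = (F ++ [x]) ++ T := by simp
      rw [hFx, ih (F ++ [x]) T hF' hT]
      simp [hx]
    | true =>
      have hT' : ∀ y ∈ T ++ [x], key y = true := by
        intro y hy
        rcases List.mem_append.1 hy with h | h
        · exact hT y h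
        · simp at h; rw [h]; exact hx
      rw [if_pos (by simp), List.append_assoc, ih F (T ++ [x]) hF hT']
      simp [hx]

-- sorted by a Bool key is the stable partition: falses first, then trues, each in original order.
lemma sorted_bool_partition {α : Type} (key : α → Bool) (xs : List α) :
    PySem.List.sorted xs key false = xs.filter (fun x => !key x) ++ xs.filter key := by
  rw [PySem.List.sorted_eq_foldl_insertBy, before_eq key]
  have := foldl_insertBy_bool key xs [] [] (by simp) (by simp)
  simpa using this

-- comprehension over filtered keys of a nodup dict re-creates the filtered items.
lemma map_getD_filter (d : List (String × String)) (q : String → Bool)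
    (h : (d.map Prod.fst).Nodup) :
    ((d.map Prod.fst).filter q).map (fun k => (k, (PySem.Dict.mk d).getD k "")) =
      d.filter (fun kv => q kv.1) := by
  induction d with
  | nil => rfl
  | cons kv rest ih =>
    obtain ⟨k, v⟩ := kv
    simp only [List.map_cons, List.nodup_cons] at h
    have hk : k ∉ rest.map Prod.fst := h.1
    have hgetk : (PySem.Dict.mk ((k, v) :: rest)).getD k "" = v := by
      simp [PySem.Dict.getD, PySem.Dict.get?_mk_cons]
    have htail : ∀ k' ∈ (rest.map Prod.fst).filter q,
        (k', (PySem.Dict.mk ((k, v) :: rest)).getD k' "") =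
          (k', (PySem.Dict.mk rest).getD k' "") := by
      intro k' hk'
      have hmem : k' ∈ rest.map Prod.fst := List.mem_of_mem_filter hk'
      have hne : (k == k') = false := by
        simp only [beq_eq_false_iff_ne, ne_eq]
        intro hkk; exact hk (hkk ▸ hmem)
      simp [PySem.Dict.getD, PySem.Dict.get?_mk_cons, hne]
    cases hq : q k with
    | false =>
      simp only [List.map_cons, List.filter_cons, hq, Bool.false_eq_true, if_false]
      rw [List.map_congr_left htail, ih h.2]
    | true =>
      simp only [List.map_cons, List.filter_cons, hq, if_true, List.map_cons, hgetk]
      rw [List.map_congr_left htail, ih h.2]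

lemma map_fst_filter_fst (d : List (String × String)) (q : String → Bool) :
    (d.filter (fun kv => q kv.1)).map Prod.fst = (d.map Prod.fst).filter q := by
  induction d with
  | nil => rfl
  | cons kv rest ih =>
    simp only [List.filter_cons, List.map_cons]
    cases hq : q kv.1 <;> simp [ih]

-- folding insert over a list of pairs with fresh distinct keys appends exactly those pairs.
lemma items_fold_pairs (l : List (String × String)) (d : PySem.Dict String String)
    (hfresh : ∀ a ∈ l, d.contains a.1 = false) (hnd : (l.map Prod.fst).Nodup) :
    (l.foldl (fun nd kv => nd.insert kv.1 kv.2) d).items = d.items ++ l := by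
  have := PySem.Dict.items_foldl_insert_fresh l Prod.fst Prod.snd d hfresh hnd
  simpa using this

lemma nodup_filter_keys (d : List (String × String)) (q : String → Bool)
    (h : (d.map Prod.fst).Nodup) : ((d.filter (fun kv => q kv.1)).map Prod.fst).Nodup := by
  rw [map_fst_filter_fst]
  exact h.filter q

-- ===== VERDICT (by name: the statement is the Claim_ definition above) =====
theorem reorder_keys_spec : Claim_equal_reorder_keys := by
  intro d _ hnd
  unfold Spec_reorder_keys reorder_keys reorder_keys_alt Pre_reorder_keys at *
  have hkeys : (PySem.Dict.mk d).keys = d.map Prod.fst := rfl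
  -- the two comprehensions of A
  have hother : ((PySem.Dict.mk d).keys.filter (fun k => !PySem.Str.startswith k "x_")).map
      (fun k => (k, (PySem.Dict.mk d).getD k "")) =
      d.filter (fun kv => !PySem.Str.startswith kv.1 "x_") := by
    rw [hkeys, map_getD_filter d (fun k => !PySem.Str.startswith k "x_") hnd]
  have hx : ((PySem.Dict.mk d).keys.filter (fun k => PySem.Str.startswith k "x_")).map
      (fun k => (k, (PySem.Dict.mk d).getD k "")) =
      d.filter (fun kv => PySem.Str.startswith kv.1 "x_") := by
    rw [hkeys, map_getD_filter d (fun k => PySem.Str.startswith k "x_") hnd]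
  simp only [hother, hx]
  -- A's two populate loops append the two filtered lists
  have h1 : ((d.filter (fun kv => !PySem.Str.startswith kv.1 "x_")).foldl
      (fun nd kv => nd.insert kv.1 kv.2) PySem.Dict.empty).items =
      d.filter (fun kv => !PySem.Str.startswith kv.1 "x_") := by
    rw [items_fold_pairs _ _ (fun a _ => PySem.Dict.contains_empty a.1)
      (nodup_filter_keys d (fun k => !PySem.Str.startswith k "x_") hnd)]
    rfl
  have hfresh2 : ∀ a ∈ d.filter (fun kv => PySem.Str.startswith kv.1 "x_"),
      ((d.filter (fun kv => !PySem.Str.startswith kv.1 "x_")).foldl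
        (fun nd kv => nd.insert kv.1 kv.2) PySem.Dict.empty).contains a.1 = false := by
    intro a ha
    have hpa : PySem.Str.startswith a.1 "x_" = true := by simpa using List.of_mem_filter ha
    by_contra hc
    have hc' : _ = true := Bool.of_not_eq_false hc
    have hmem := (PySem.Dict.contains_iff_mem_keys _ _).1 hc'
    simp only [PySem.Dict.keys, h1] at hmem
    obtain ⟨b, hb, hba⟩ := List.mem_map.1 hmem
    have hpb : PySem.Str.startswith b.1 "x_" = false := by simpa using List.of_mem_filter hb
    rw [hba, hpa] at hpb
    exact Bool.true_eq_false.mp hpb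
  have h2 : ((d.filter (fun kv => PySem.Str.startswith kv.1 "x_")).foldl
      (fun nd kv => nd.insert kv.1 kv.2)
      ((d.filter (fun kv => !PySem.Str.startswith kv.1 "x_")).foldl
        (fun nd kv => nd.insert kv.1 kv.2) PySem.Dict.empty)).items
      = d.filter (fun kv => !PySem.Str.startswith kv.1 "x_") ++
        d.filter (fun kv => PySem.Str.startswith kv.1 "x_") := by
    rw [items_fold_pairs _ _ hfresh2 (nodup_filter_keys d (fun k => PySem.Str.startswith k "x_") hnd), h1]
  -- B: the stable bool-key sort is the same partition, and ofList keeps it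
  have hsort : PySem.List.sorted (PySem.Dict.mk d).items
      (fun kv => PySem.Str.startswith kv.1 "x_") false
      = d.filter (fun kv => !PySem.Str.startswith kv.1 "x_") ++
        d.filter (fun kv => PySem.Str.startswith kv.1 "x_") := by
    have := sorted_bool_partition (fun kv : String × String =>
      PySem.Str.startswith kv.1 "x_") d
    simpa using this
  have hndB : (((d.filter (fun kv => !PySem.Str.startswith kv.1 "x_") ++
      d.filter (fun kv => PySem.Str.startswith kv.1 "x_"))).map Prod.fst).Nodup := by
    rw [List.map_append, map_fst_filter_fst d (fun k => !PySem.Str.startswith k "x_"),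
      map_fst_filter_fst d (fun k => PySem.Str.startswith k "x_")]
    refine List.Nodup.append (hnd.filter _) (hnd.filter _) ?_
    intro k h1' h2'
    have e1 := List.of_mem_filter h1'
    have e2 := List.of_mem_filter h2'
    simp at e2
    simp [e2] at e1
  have hofList : (PySem.Dict.ofList (d.filter (fun kv => !PySem.Str.startswith kv.1 "x_") ++
      d.filter (fun kv => PySem.Str.startswith kv.1 "x_"))).items
      = d.filter (fun kv => !PySem.Str.startswith kv.1 "x_") ++
        d.filter (fun kv => PySem.Str.startswith kv.1 "x_") := by
    show ((d.filter (fun kv => !PySem.Str.startswith kv.1 "x_") ++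
        d.filter (fun kv => PySem.Str.startswith kv.1 "x_")).foldl
      (fun nd kv => nd.insert kv.1 kv.2) PySem.Dict.empty).items = _
    rw [items_fold_pairs _ _ (fun a _ => PySem.Dict.contains_empty a.1) hndB]
    rfl
  rw [h2, hsort, hofList]
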